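-- pv_equiv track=rewrite | github.com/alexbostock/gsa-ultra | 12-a.py | solution
-- ===== SOURCE A (Python) =====
-- def sets_of_n(l, n):
--     if n == 0:
--         return [[]]
--     #elif n < len(l):
--     elif len(l) == 0:
--         return []
--
--     a = sets_of_n(l[1:], n)
--     b = sets_of_n(l[1:], n - 1)
--     for x in b:
--         x.append(l[0])
--         a.append(x)
--
--     return a
--
-- def combined_range(l):
--     mini, maxi = l[0]
--
--     for x in l:
--         a, b = x
--         mini = min(a, mini)
--         maxi = max(b, maxi)
--
--     return mini, maxi
--
-- def solution(n, x, r):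
--     # ranges_covered[i] should be a tuple (a, b) such that, if explosive[i] is
--     # detonated, all explosives in the range x = a to b (inclusive) will be
--     # detonated.
--     ranges_covered = []
--
--     overall_min = x[0]
--     overall_max = x[0]
--
--     for i in range(n):
--         ranges_covered.append((x[i] - r[i], x[i] + r[i]))
--
--         flag = True
--         while flag:
--             flag = False
--             minimum, maximum = ranges_covered[i]
--             for j in range(n):
--                 if x[j] < minimum:
--                     minimum = x[j]
--                     flag = True
--                 elif x[j] > maximum:
--                     maximum = x[j]
--                     flag = True
--             ranges_covered[i] = (minimum, maximum)
--
--             if minimum < overall_min: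
--                 overall_min = minimum
--             if maximum > overall_max:
--                 overall_max = maximum
--
--     for i in range(n):
--         combs = sets_of_n(ranges_covered, i + 1)
--         for comb in combs:
--             min, max = combined_range(comb)
--             if min == overall_min and max == overall_max:
--                 return i + 1
-- ===== SOURCE B (Python) =====
-- def solution(n, x, r):
--     # One linear pass: every expanded range i equals
--     # (min(lo, x[i]-r[i]), max(hi, x[i]+r[i])) over the first n explosives,
--     # so the answer is 1 if a single range attains both overall extremes, else 2.
--     if n <= 0:
--         return None
--     xs = x[:n]
--     lo = min(xs)
--     hi = max(xs)
--     mins = [min(lo, x[i] - r[i]) for i in range(n)]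
--     maxs = [max(hi, x[i] + r[i]) for i in range(n)]
--     ov_min = min(mins)
--     ov_max = max(maxs)
--     if any(a == ov_min and b == ov_max for a, b in zip(mins, maxs)):
--         return 1
--     return 2
-- ===== Notes on version B (the rewrite author's own statement) =====
-- stated objective: faster
-- what changed: A expands each range with a repeated fixpoint loop and then enumerates size-k subsets of ranges (sets_of_n) looking for a covering combination; B computes each expanded range in closed form in one pass and returns 1 if a single range attains both overall extremes, else 2, since a min-attaining and a max-attaining range always cover everything. Intended as faster; a timing run measured A 221 ms vs B 0.5 ms at n=1024 and A 996 ms vs B 0.7 ms at n=4096, with A timing out on most larger inputs, so the largest-size rule could not confirm the label.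
import Mathlib
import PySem

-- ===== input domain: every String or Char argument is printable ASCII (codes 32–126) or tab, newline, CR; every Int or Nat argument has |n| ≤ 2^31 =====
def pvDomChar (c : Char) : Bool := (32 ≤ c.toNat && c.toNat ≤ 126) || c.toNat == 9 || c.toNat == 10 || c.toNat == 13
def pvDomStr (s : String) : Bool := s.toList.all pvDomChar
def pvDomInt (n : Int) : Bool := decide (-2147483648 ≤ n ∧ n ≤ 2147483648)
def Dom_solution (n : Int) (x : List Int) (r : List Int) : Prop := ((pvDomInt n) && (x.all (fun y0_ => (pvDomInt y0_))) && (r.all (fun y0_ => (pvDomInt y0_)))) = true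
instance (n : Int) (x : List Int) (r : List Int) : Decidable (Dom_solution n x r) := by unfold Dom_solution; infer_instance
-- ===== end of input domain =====

-- B replaces A's subset enumeration and repeated expansion passes by one linear
-- pass over closed-form expanded ranges (objective: faster; intended O(n) vs A's
-- polynomial scan — a timing run measured B far ahead at n=1024/4096 but A
-- timed out at larger sizes, so the label stands unconfirmed at the largest size).

-- ===== PORT A =====

-- sets_of_n: Python appends l[0] at the end of each list of b, then appends to a.
def setsOfN (l : List (Int × Int)) (n : Int) : List (List (Int × Int)) :=
  if n = 0 then [[]]
  else match l with
  | [] => []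
  | h :: t =>
    setsOfN t n ++ (setsOfN t (n - 1)).map (fun xs => xs ++ [h])

-- combined_range: l[0] raises IndexError on [] (returns none; unreachable in solution's use).
def combinedRange (l : List (Int × Int)) : Option (Int × Int) :=
  match l with
  | [] => none
  | p :: _ => some (l.foldl (fun acc q => (min q.1 acc.1, max q.2 acc.2)) (p.1, p.2))

-- one step of the inner `for j in range(n)` loop (state: ((minimum, maximum), flag))
def passStep (st : (Int × Int) × Bool) (xj : Int) : (Int × Int) × Bool :=
  if xj < st.1.1 then ((xj, st.1.2), true)
  else if xj > st.1.2 then ((st.1.1, xj), true)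
  else st

-- the `while flag:` loop; fuel is a termination guard only: the Python loop
-- always stabilises within 3 passes (proved below), and solution passes fuel ≥ 3.
def expandLoop (xs : List Int) (fuel : Nat) (mm : Int × Int) (ov : Int × Int) :
    (Int × Int) × (Int × Int) :=
  match fuel with
  | 0 => (mm, ov)
  | fuel + 1 =>
    let st := xs.foldl passStep (mm, false)
    if st.2 then
      expandLoop xs fuel st.1
        (if st.1.1 < ov.1 then st.1.1 else ov.1, if st.1.2 > ov.2 then st.1.2 else ov.2)
    else
      (st.1, (if st.1.1 < ov.1 then st.1.1 else ov.1, if st.1.2 > ov.2 then st.1.2 else ov.2))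

-- body of the first `for i in range(n):` loop (append the stabilised range, update overall)
def buildStep (x r : List Int) (xsn : List Int) (fuel : Nat)
    (st : List (Int × Int) × (Int × Int)) (i : Nat) : List (Int × Int) × (Int × Int) :=
  (st.1 ++ [(expandLoop xsn fuel (x.getD i 0 - r.getD i 0, x.getD i 0 + r.getD i 0) st.2).1],
   (expandLoop xsn fuel (x.getD i 0 - r.getD i 0, x.getD i 0 + r.getD i 0) st.2).2)

-- second loop: `for i in range(n):` scanning combs; returns on the first i whose
-- combs contain a combination covering the overall extremes.
def searchLoop (rc : List (Int × Int)) (om oM : Int) : List Nat → Option Int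
  | [] => none
  | i :: rest =>
    if (setsOfN rc ((i : Int) + 1)).any (fun comb =>
        match combinedRange comb with
        | some p => p.1 == om && p.2 == oM
        | none => false) then
      some ((i : Int) + 1)
    else searchLoop rc om oM rest

-- x.getD i 0 ports x[i] / r[i]; exact under Pre_solution (every index used is in
-- range); range(n) is List.range n.toNat (empty for n ≤ 0, as in Python).
def solution (n : Int) (x : List Int) (r : List Int) : Option Int :=
  match x with
  | [] => none      -- x[0] raises IndexError; excluded by Pre_solution
  | x0 :: _ =>
    let N := n.toNat
    let xsn := (List.range N).map (fun j => x.getD j 0)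
    let st := (List.range N).foldl (buildStep x r xsn (2 * N + 3)) ([], (x0, x0))
    searchLoop st.1 st.2.1 st.2.2 (List.range N)

-- ===== PORT B =====

-- min(xs)/max(xs) of a nonempty list are the running fold; min([]) would raise
-- ValueError (none; excluded by Pre_solution).
def solution_alt (n : Int) (x : List Int) (r : List Int) : Option Int :=
  if n ≤ 0 then none
  else
    match x.take n.toNat with
    | [] => none
    | y :: ys =>
      let lo := ys.foldl min y
      let hi := ys.foldl max y
      let mins := (List.range n.toNat).map (fun i => min lo (x.getD i 0 - r.getD i 0))
      let maxs := (List.range n.toNat).map (fun i => max hi (x.getD i 0 + r.getD i 0))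
      match mins, maxs with
      | m :: ms, M :: Ms =>
        let ovmin := ms.foldl min m
        let ovmax := Ms.foldl max M
        if (mins.zip maxs).any (fun p => p.1 == ovmin && p.2 == ovmax) then some 1
        else some 2
      | _, _ => none   -- unreachable: n ≥ 1 makes both lists nonempty

-- ===== PRECONDITION & SPEC =====
-- Pre_solution: exactly the inputs where A returns normally: x[0] exists, and when
-- the loops run (n > 0) every x[i], r[i] for i < n exists (else IndexError).
def Pre_solution (n : Int) (x : List Int) (r : List Int) : Prop :=
  x ≠ [] ∧ (0 < n → n ≤ (x.length : Int) ∧ n ≤ (r.length : Int))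
instance (n : Int) (x : List Int) (r : List Int) : Decidable (Pre_solution n x r) := by
  unfold Pre_solution; infer_instance

def pvWitness_solution : Int × List Int × List Int := (2, [0, 5], [1, 1])

def Spec_solution (n : Int) (x : List Int) (r : List Int) (out : Option Int) : Prop := out = solution_alt n x r
instance (n : Int) (x : List Int) (r : List Int) (out : Option Int) : Decidable (Spec_solution n x r out) := by unfold Spec_solution; infer_instance

-- ===== CLAIM (what is proved, stated in full; the proofs are below) =====
def Claim_equal_solution : Prop := ∀ (n : Int) (x : List Int) (r : List Int), Dom_solution n x r → Pre_solution n x r → Spec_solution n x r (solution n x r)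

-- ===== LEMMAS AND PROOFS =====

-- proof-side closed forms of the stabilised ranges
def pmF (x r : List Int) (mx : Int) (i : Nat) : Int := min (x.getD i 0 - r.getD i 0) mx
def pMF (x r : List Int) (mX : Int) (i : Nat) : Int := max (x.getD i 0 + r.getD i 0) mX

theorem foldl_min_shift (xs : List Int) : ∀ (a c : Int),
    xs.foldl min (min a c) = min a (xs.foldl min c) := by
  induction xs with
  | nil => intro a c; rfl
  | cons b t ih =>
    intro a c
    simp only [List.foldl]
    have h : min (min a c) b = min a (min c b) := by omega
    rw [h, ih]

theorem foldl_max_shift (xs : List Int) : ∀ (a c : Int),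
    xs.foldl max (max a c) = max a (xs.foldl max c) := by
  induction xs with
  | nil => intro a c; rfl
  | cons b t ih =>
    intro a c
    simp only [List.foldl]
    have h : max (max a c) b = max a (max c b) := by omega
    rw [h, ih]

theorem foldl_max_mono (xs : List Int) : ∀ {a b : Int}, a ≤ b →
    xs.foldl max a ≤ xs.foldl max b := by
  induction xs with
  | nil => intro a b h; exact h
  | cons c t ih => intro a b h; simp only [List.foldl]; exact ih (by omega)

theorem pass_min (xs : List Int) : ∀ (mn mx : Int) (f : Bool),
    ((xs.foldl passStep ((mn, mx), f)).1).1 = xs.foldl min mn := by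
  induction xs with
  | nil => intro mn mx f; rfl
  | cons a t ih =>
    intro mn mx f
    simp only [List.foldl, passStep]
    split_ifs with h1 h2
    · rw [ih]; congr 1; omega
    · rw [ih]; congr 1; omega
    · rw [ih]; congr 1; omega

theorem pass_flag_mono (xs : List Int) : ∀ (p : Int × Int),
    (xs.foldl passStep (p, true)).2 = true := by
  induction xs with
  | nil => intro p; rfl
  | cons a t ih =>
    intro p
    simp only [List.foldl, passStep]
    split_ifs <;> exact ih _

theorem pass_max_lb (xs : List Int) : ∀ (mn mx : Int) (f : Bool),
    mx ≤ ((xs.foldl passStep ((mn, mx), f)).1).2 := by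
  induction xs with
  | nil => intro mn mx f; exact le_refl _
  | cons a t ih =>
    intro mn mx f
    simp only [List.foldl, passStep]
    split_ifs with h1 h2
    · exact ih _ _ _
    · exact le_trans (le_of_lt h2) (ih _ _ _)
    · exact ih _ _ _

theorem pass_max_ub (xs : List Int) : ∀ (mn mx : Int) (f : Bool),
    ((xs.foldl passStep ((mn, mx), f)).1).2 ≤ xs.foldl max mx := by
  induction xs with
  | nil => intro mn mx f; exact le_refl _
  | cons a t ih =>
    intro mn mx f
    simp only [List.foldl, passStep]
    split_ifs with h1 h2
    · exact le_trans (ih _ _ _) (foldl_max_mono t (by omega))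
    · have h : max mx a = a := by omega
      rw [h]; exact ih _ _ _
    · exact le_trans (ih _ _ _) (foldl_max_mono t (by omega))

theorem pass_noflag (xs : List Int) : ∀ (mn mx : Int),
    (xs.foldl passStep ((mn, mx), false)).2 = false →
    (xs.foldl passStep ((mn, mx), false)).1 = (mn, mx) ∧ ∀ b ∈ xs, mn ≤ b ∧ b ≤ mx := by
  induction xs with
  | nil => intro mn mx _; exact ⟨rfl, by simp⟩
  | cons a t ih =>
    intro mn mx h
    simp only [List.foldl, passStep] at h ⊢
    split_ifs at h ⊢ with h1 h2
    · rw [pass_flag_mono] at h; exact absurd h (by simp)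
    · rw [pass_flag_mono] at h; exact absurd h (by simp)
    · obtain ⟨he, hb⟩ := ih mn mx h
      refine ⟨he, ?_⟩
      intro b hbmem
      rcases List.mem_cons.1 hbmem with rfl | hmem
      · exact ⟨by omega, by omega⟩
      · exact hb b hmem

theorem pass_dom_min (xs : List Int) : ∀ (mn mx : Int) (f : Bool),
    (∀ b ∈ xs, mn ≤ b) →
    (xs.foldl passStep ((mn, mx), f)).1 = (mn, xs.foldl max mx) := by
  induction xs with
  | nil => intro mn mx f _; rfl
  | cons a t ih =>
    intro mn mx f hdom
    have ha : mn ≤ a := hdom a (List.mem_cons_self ..)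
    simp only [List.foldl, passStep]
    split_ifs with h1 h2
    · omega
    · have h : max mx a = a := by omega
      rw [h]; exact ih _ _ _ (fun b hb => hdom b (List.mem_cons_of_mem _ hb))
    · have h : max mx a = mx := by omega
      rw [h]; exact ih _ _ _ (fun b hb => hdom b (List.mem_cons_of_mem _ hb))

theorem pass_inert (xs : List Int) : ∀ (st : (Int × Int) × Bool),
    (∀ b ∈ xs, st.1.1 ≤ b ∧ b ≤ st.1.2) → xs.foldl passStep st = st := by
  induction xs with
  | nil => intro st _; rfl
  | cons a t ih =>
    intro st hb
    obtain ⟨h1, h2⟩ := hb a (List.mem_cons_self ..)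
    simp only [List.foldl, passStep]
    split_ifs with hc1 hc2
    · omega
    · omega
    · exact ih st (fun b hbm => hb b (List.mem_cons_of_mem _ hbm))

-- the `while flag:` loop stabilises within three passes: closed form of its result
theorem expandLoop_succ (xs : List Int) (fuel : Nat) (mm ov : Int × Int) :
    expandLoop xs (fuel + 1) mm ov =
      (if (xs.foldl passStep (mm, false)).2 then
        expandLoop xs fuel (xs.foldl passStep (mm, false)).1
          (if (xs.foldl passStep (mm, false)).1.1 < ov.1 then (xs.foldl passStep (mm, false)).1.1
           else ov.1,
           if (xs.foldl passStep (mm, false)).1.2 > ov.2 then (xs.foldl passStep (mm, false)).1.2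
           else ov.2)
      else
        ((xs.foldl passStep (mm, false)).1,
         (if (xs.foldl passStep (mm, false)).1.1 < ov.1 then (xs.foldl passStep (mm, false)).1.1
          else ov.1,
          if (xs.foldl passStep (mm, false)).1.2 > ov.2 then (xs.foldl passStep (mm, false)).1.2
          else ov.2))) := rfl

theorem expandLoop_eq (y : Int) (ys : List Int) (fuel : Nat) (a b u v : Int) :
    expandLoop (y :: ys) (fuel + 3) (a, b) (u, v) =
      ((min a (ys.foldl min y), max b (ys.foldl max y)),
       (min u (min a (ys.foldl min y)), max v (max b (ys.foldl max y)))) := by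
  have hmem_mx : ∀ c ∈ y :: ys, ys.foldl min y ≤ c := by
    intro c hc
    rcases List.mem_cons.1 hc with rfl | h
    · exact (PySem.List.foldl_min_le ys c).1
    · exact (PySem.List.foldl_min_le ys y).2 _ h
  have hmem_Mx : ∀ c ∈ y :: ys, c ≤ ys.foldl max y := by
    intro c hc
    rcases List.mem_cons.1 hc with rfl | h
    · exact (PySem.List.le_foldl_max ys c).1
    · exact (PySem.List.le_foldl_max ys y).2 _ h
  set mx := ys.foldl min y with hmx
  set Mx := ys.foldl max y with hMx
  -- pass 1
  rw [show fuel + 3 = fuel + 2 + 1 from rfl, expandLoop_succ]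
  set st1 := (y :: ys).foldl passStep ((a, b), false) with hst1
  have hm1 : st1.1.1 = min a mx := by
    rw [hst1, pass_min]
    show List.foldl min (min a y) ys = _
    rw [foldl_min_shift]
  have hb_le : b ≤ st1.1.2 := pass_max_lb (y :: ys) a b false
  have hub : st1.1.2 ≤ max b Mx := by
    have h := pass_max_ub (y :: ys) a b false
    rw [← hst1] at h
    have h2 : (y :: ys).foldl max b = max b Mx := by
      show List.foldl max (max b y) ys = _
      rw [foldl_max_shift]
    rw [h2] at h
    exact h
  by_cases hfl1 : st1.2
  · simp only [hfl1, if_true]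
    -- pass 2
    rw [show fuel + 2 = fuel + 1 + 1 from rfl, expandLoop_succ]
    set st2 := (y :: ys).foldl passStep (st1.1, false) with hst2
    have hdom : ∀ c ∈ y :: ys, st1.1.1 ≤ c := by
      intro c hc; rw [hm1]; exact le_trans (min_le_right _ _) (hmem_mx c hc)
    have hst2v : st2.1 = (st1.1.1, max b Mx) := by
      rw [hst2]
      have h := pass_dom_min (y :: ys) st1.1.1 st1.1.2 false hdom
      rw [h]
      have h2 : (y :: ys).foldl max st1.1.2 = max st1.1.2 Mx := by
        show List.foldl max (max st1.1.2 y) ys = _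
        rw [foldl_max_shift]
      rw [h2]
      have : max st1.1.2 Mx = max b Mx := by omega
      rw [this]
    by_cases hfl2 : st2.2
    · simp only [hfl2, if_true]
      -- pass 3: no further change
      rw [show fuel + 1 = fuel + 1 from rfl, expandLoop_succ]
      set st3 := (y :: ys).foldl passStep (st2.1, false) with hst3
      have hst3v : st3 = (st2.1, false) := by
        rw [hst3]
        apply pass_inert
        intro c hc
        rw [hst2v]
        exact ⟨by have h1 := hmem_mx c hc; have h2 := hm1; omega,
               by have := hmem_Mx c hc; omega⟩
      rw [hst3v]
      simp only [Bool.false_eq_true, if_false]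
      rw [hst2v]
      refine Prod.ext (Prod.ext ?_ ?_) (Prod.ext ?_ ?_) <;> dsimp only <;> (try split_ifs) <;> omega
    · simp only [Bool.not_eq_true] at hfl2
      simp only [hfl2, Bool.false_eq_true, if_false]
      rw [hst2v]
      refine Prod.ext (Prod.ext ?_ ?_) (Prod.ext ?_ ?_) <;> dsimp only <;> (try split_ifs) <;> omega
  · simp only [Bool.not_eq_true] at hfl1
    simp only [hfl1, Bool.false_eq_true, if_false]
    obtain ⟨hid, hbnds⟩ := pass_noflag (y :: ys) a b (by rw [← hst1]; exact hfl1)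
    rw [← hst1] at hid
    have hminax : min a mx = a := by
      have h1 : st1.1.1 = a := by rw [hid]
      omega
    have hmaxbx : max b Mx = b := by
      have h2 : Mx ≤ b := by
        rcases PySem.List.foldl_max_mem ys y with h | h
        · rw [hMx, h]; exact (hbnds y (List.mem_cons_self ..)).2
        · rw [hMx] at *; exact (hbnds _ (List.mem_cons_of_mem _ h)).2
      omega
    rw [hid]
    refine Prod.ext (Prod.ext ?_ ?_) (Prod.ext ?_ ?_) <;> dsimp only <;> (try split_ifs) <;> omega

-- closed form of the whole first loop
theorem build_fold (x r : List Int) (y : Int) (ys : List Int) (F : Nat) :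
    ∀ (I : List Nat) (acc : List (Int × Int)) (u v : Int),
      I.foldl (buildStep x r (y :: ys) (F + 3)) (acc, (u, v)) =
        (acc ++ I.map (fun i => (pmF x r (ys.foldl min y) i, pMF x r (ys.foldl max y) i)),
         (I.foldl (fun w i => min w (pmF x r (ys.foldl min y) i)) u,
          I.foldl (fun w i => max w (pMF x r (ys.foldl max y) i)) v)) := by
  intro I
  induction I with
  | nil => intro acc u v; simp
  | cons i t ih =>
    intro acc u v
    simp only [List.foldl, List.map]
    rw [show (buildStep x r (y :: ys) (F + 3) (acc, (u, v)) i) =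
        (acc ++ [(pmF x r (ys.foldl min y) i, pMF x r (ys.foldl max y) i)],
         (min u (pmF x r (ys.foldl min y) i), max v (pMF x r (ys.foldl max y) i))) from by
      simp only [buildStep, expandLoop_eq, pmF, pMF]]
    rw [ih]
    simp [List.append_assoc]

theorem range_getD_eq_take (x : List Int) (N : Nat) (h : N ≤ x.length) :
    (List.range N).map (fun j => x.getD j 0) = x.take N := by
  apply List.ext_getElem
  · simp [h]
  · intro i h1 h2
    simp only [List.getElem_map, List.getElem_range, List.getElem_take]
    rw [List.getD_eq_getElem]

theorem setsOfN_zero (l : List (Int × Int)) : setsOfN l 0 = [[]] := by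
  cases l <;> simp [setsOfN]

theorem mem_setsOfN_one (l : List (Int × Int)) (c : List (Int × Int)) :
    c ∈ setsOfN l 1 ↔ ∃ p ∈ l, c = [p] := by
  induction l with
  | nil => simp [setsOfN]
  | cons h t ih =>
    show c ∈ setsOfN (h :: t) 1 ↔ _
    rw [show setsOfN (h :: t) 1 = setsOfN t 1 ++ (setsOfN t 0).map (fun xs => xs ++ [h]) from by
      simp [setsOfN]]
    rw [setsOfN_zero]
    simp only [List.mem_append, List.map, List.nil_append, List.mem_singleton, ih]
    constructor
    · rintro (⟨p, hp, rfl⟩ | rfl)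
      · exact ⟨p, List.mem_cons_of_mem _ hp, rfl⟩
      · exact ⟨h, List.mem_cons_self .., rfl⟩
    · rintro ⟨p, hp, rfl⟩
      rcases List.mem_cons.1 hp with rfl | hmem
      · exact Or.inr rfl
      · exact Or.inl ⟨p, hmem, rfl⟩

theorem pair_mem_setsOfN (l : List (Int × Int)) : ∀ (i j : Nat), i < j → j < l.length →
    [l.getD j (0, 0), l.getD i (0, 0)] ∈ setsOfN l 2 := by
  induction l with
  | nil => intro i j _ hj; simp at hj
  | cons h t ih =>
    intro i j hij hj
    rw [show setsOfN (h :: t) 2 = setsOfN t 2 ++ (setsOfN t 1).map (fun xs => xs ++ [h]) from by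
      simp [setsOfN]]
    rw [List.mem_append]
    obtain ⟨j', rfl⟩ : ∃ j', j = j' + 1 := ⟨j - 1, by omega⟩
    have hj' : j' < t.length := by simpa using hj
    cases i with
    | zero =>
      right
      refine List.mem_map.2 ⟨[t.getD j' (0, 0)], ?_, ?_⟩
      · rw [mem_setsOfN_one]
        refine ⟨t.getD j' (0, 0), ?_, rfl⟩
        rw [List.getD_eq_getElem _ _ hj']
        exact List.getElem_mem _
      · simp
    | succ i' =>
      left
      have := ih i' j' (by omega) hj'
      simpa [List.getD_cons_succ] using this

theorem combinedRange_single (p : Int × Int) : combinedRange [p] = some p := by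
  simp [combinedRange]

theorem combinedRange_pair (p q : Int × Int) :
    combinedRange [p, q] = some (min q.1 p.1, max q.2 p.2) := by
  simp [combinedRange]

theorem any_cover (rc : List (Int × Int)) (om oM : Int) (k : Int) :
    ((setsOfN rc k).any (fun comb => match combinedRange comb with
        | some p => p.1 == om && p.2 == oM
        | none => false)) = true ↔
      ∃ c ∈ setsOfN rc k, combinedRange c = some (om, oM) := by
  rw [List.any_eq_true]
  constructor
  · rintro ⟨c, hc, hchk⟩
    refine ⟨c, hc, ?_⟩
    cases hcr : combinedRange c with
    | none => rw [hcr] at hchk; exact Bool.noConfusion hchk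
    | some p =>
      rw [hcr] at hchk
      have hchk' : (p.1 == om && p.2 == oM) = true := hchk
      simp only [Bool.and_eq_true, beq_iff_eq] at hchk'
      exact congrArg some (Prod.ext hchk'.1 hchk'.2)
  · rintro ⟨c, hc, hcr⟩
    refine ⟨c, hc, ?_⟩
    rw [hcr]
    simp

theorem searchLoop_cons (rc : List (Int × Int)) (om oM : Int) (i : Nat) (rest : List Nat) :
    searchLoop rc om oM (i :: rest) =
      if ((setsOfN rc ((i : Int) + 1)).any (fun comb => match combinedRange comb with
          | some p => p.1 == om && p.2 == oM
          | none => false)) = true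
      then some ((i : Int) + 1) else searchLoop rc om oM rest := rfl

theorem solution_spec : Claim_equal_solution := by
  intro n x r _ hpre
  unfold Spec_solution
  obtain ⟨hx0, hbound⟩ := hpre
  cases x with
  | nil => exact absurd rfl hx0
  | cons x0 xt =>
    by_cases hn : n ≤ 0
    · have hN0 : n.toNat = 0 := by omega
      simp [solution, solution_alt, hn, hN0, searchLoop]
    · have hn' : 0 < n := by omega
      obtain ⟨hxlen', hrlen'⟩ := hbound hn' 
      have hN1 : 1 ≤ n.toNat := by omega
      have hxlen : n.toNat ≤ (x0 :: xt).length := by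
        simp only [List.length_cons] at hxlen' ⊢; omega
      obtain ⟨K, hNK⟩ : ∃ K, n.toNat = K + 1 := ⟨n.toNat - 1, by omega⟩
      set N := n.toNat with hNdef
      set ys := xt.take K with hysdef
      have htk : (x0 :: xt).take N = x0 :: ys := by rw [hNK, List.take_succ_cons, hysdef]
      have htake : (List.range N).map (fun j => (x0 :: xt).getD j 0) = x0 :: ys := by
        rw [range_getD_eq_take _ _ hxlen, htk]
      set mx := ys.foldl min x0 with hmxdef
      set Mx := ys.foldl max x0 with hMxdef
      set pm := pmF (x0 :: xt) r mx with hpmdef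
      set pM := pMF (x0 :: xt) r Mx with hpMdef
      set OM := (List.range N).foldl (fun w i => min w (pm i)) x0 with hOMdef
      set OX := (List.range N).foldl (fun w i => max w (pM i)) x0 with hOXdef
      set rc := (List.range N).map (fun i => (pm i, pM i)) with hrcdef
      -- A reduces to the search loop over the closed-form ranges
      have hAside : solution n (x0 :: xt) r = searchLoop rc OM OX (List.range N) := by
        simp only [solution]
        rw [htake, build_fold]
        simp only [List.nil_append]
        rw [← hmxdef, ← hMxdef, ← hpmdef, ← hpMdef, ← hOMdef, ← hOXdef, ← hrcdef]
      -- basic facts about the extremes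
      have h0mem : 0 ∈ List.range N := by simp [List.mem_range]; omega
      have hOM_le : ∀ k ∈ List.range N, OM ≤ pm k := by
        intro k hk
        rw [hOMdef, ← List.foldl_map]
        exact (PySem.List.foldl_min_le _ x0).2 _ (List.mem_map.2 ⟨k, hk, rfl⟩)
      have hOX_ge : ∀ k ∈ List.range N, pM k ≤ OX := by
        intro k hk
        rw [hOXdef, ← List.foldl_map]
        exact (PySem.List.le_foldl_max _ x0).2 _ (List.mem_map.2 ⟨k, hk, rfl⟩)
      have hpm0 : pm 0 ≤ x0 := by
        have h1 : mx ≤ x0 := (PySem.List.foldl_min_le ys x0).1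
        have h2 : pm 0 ≤ mx := min_le_right _ _
        omega
      have hpM0 : x0 ≤ pM 0 := by
        have h1 : x0 ≤ Mx := (PySem.List.le_foldl_max ys x0).1
        have h2 : Mx ≤ pM 0 := le_max_right _ _
        omega
      have hOM_mem : ∃ k ∈ List.range N, pm k = OM := by
        have hmem := PySem.List.foldl_min_mem ((List.range N).map pm) x0
        rw [List.foldl_map, ← hOMdef] at hmem
        rcases hmem with h | h
        · refine ⟨0, h0mem, ?_⟩
          have := hOM_le 0 h0mem
          omega
        · obtain ⟨k, hk, hkeq⟩ := List.mem_map.1 h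
          exact ⟨k, hk, hkeq⟩
      have hOX_mem : ∃ k ∈ List.range N, pM k = OX := by
        have hmem := PySem.List.foldl_max_mem ((List.range N).map pM) x0
        rw [List.foldl_map, ← hOXdef] at hmem
        rcases hmem with h | h
        · refine ⟨0, h0mem, ?_⟩
          have := hOX_ge 0 h0mem
          omega
        · obtain ⟨k, hk, hkeq⟩ := List.mem_map.1 h
          exact ⟨k, hk, hkeq⟩
      have hrcget : ∀ k, k < N → rc.getD k (0, 0) = (pm k, pM k) := by
        intro k hk
        rw [hrcdef, List.getD_eq_getElem _ _ (by simpa using hk)]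
        simp
      -- B reduces to the single-pass test
      have hBside : solution_alt n (x0 :: xt) r =
          if ∃ k ∈ List.range N, pm k = OM ∧ pM k = OX then some 1 else some 2 := by
        simp only [solution_alt, if_neg (by omega : ¬ n ≤ 0)]
        rw [htk]
        dsimp only
        rw [← hmxdef, ← hMxdef]
        have hmins : (List.range N).map (fun i => min mx ((x0 :: xt).getD i 0 - r.getD i 0)) =
            (List.range N).map pm := by
          apply List.map_congr_left
          intro i _
          rw [hpmdef]
          simp only [pmF]
          omega
        have hmaxs : (List.range N).map (fun i => max Mx ((x0 :: xt).getD i 0 + r.getD i 0)) =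
            (List.range N).map pM := by
          apply List.map_congr_left
          intro i _
          rw [hpMdef]
          simp only [pMF]
          omega
        rw [hmins, hmaxs]
        have hrange : List.range N = 0 :: (List.range K).map Nat.succ := by
          rw [hNK, List.range_succ_eq_map]
        rw [hrange]
        simp only [List.map_cons]
        have hov1 : (((List.range K).map Nat.succ).map pm).foldl min (pm 0) = OM := by
          have h1 : OM = min x0 ((((List.range K).map Nat.succ).map pm).foldl min (pm 0)) := by
            rw [hOMdef, ← List.foldl_map, hrange]
            simp only [List.map_cons, List.foldl_cons]
            rw [foldl_min_shift]
          have h2 := (PySem.List.foldl_min_le ((((List.range K).map Nat.succ)).map pm) (pm 0)).1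
          omega
        have hov2 : (((List.range K).map Nat.succ).map pM).foldl max (pM 0) = OX := by
          have h1 : OX = max x0 ((((List.range K).map Nat.succ).map pM).foldl max (pM 0)) := by
            rw [hOXdef, ← List.foldl_map, hrange]
            simp only [List.map_cons, List.foldl_cons]
            rw [foldl_max_shift]
          have h2 := (PySem.List.le_foldl_max ((((List.range K).map Nat.succ)).map pM) (pM 0)).1
          omega
        rw [hov1, hov2]
        have hzip : (pm 0 :: ((List.range K).map Nat.succ).map pm).zip
              (pM 0 :: ((List.range K).map Nat.succ).map pM) =
            (0 :: (List.range K).map Nat.succ).map (fun i => (pm i, pM i)) := by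
          simp only [List.map_cons, List.zip_cons_cons, List.zip_map']
        simp only [hzip, ← hrange]
        by_cases hC : ∃ k ∈ List.range N, pm k = OM ∧ pM k = OX
        · rw [if_pos hC]
          have : ((List.range N).map (fun i => (pm i, pM i))).any
              (fun p => p.1 == OM && p.2 == OX) = true := by
            rw [List.any_eq_true]
            obtain ⟨k, hk, h1, h2⟩ := hC
            exact ⟨(pm k, pM k), List.mem_map.2 ⟨k, hk, rfl⟩, by simp [h1, h2]⟩
          simp [this]
        · rw [if_neg hC]
          have : ((List.range N).map (fun i => (pm i, pM i))).any
              (fun p => p.1 == OM && p.2 == OX) = false := by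
            rw [← Bool.not_eq_true, List.any_eq_true]
            rintro ⟨p, hp, hchk⟩
            obtain ⟨k, hk, rfl⟩ := List.mem_map.1 hp
            simp only [Bool.and_eq_true, beq_iff_eq] at hchk
            exact hC ⟨k, hk, hchk.1, hchk.2⟩
          simp [this]
      -- now compare the two sides
      rw [hAside, hBside]
      by_cases hC : ∃ k ∈ List.range N, pm k = OM ∧ pM k = OX
      · rw [if_pos hC]
        -- the singleton check succeeds at i = 0
        have hb1 : ((setsOfN rc (((0 : Nat) : Int) + 1)).any (fun comb =>
            match combinedRange comb with
            | some p => p.1 == OM && p.2 == OX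
            | none => false)) = true := by
          have h01 : ((0 : Nat) : Int) + 1 = 1 := by norm_num
          rw [h01, any_cover]
          obtain ⟨k, hk, h1, h2⟩ := hC
          refine ⟨[(pm k, pM k)], ?_, ?_⟩
          · rw [mem_setsOfN_one]
            exact ⟨(pm k, pM k), List.mem_map.2 ⟨k, hk, rfl⟩, rfl⟩
          · rw [combinedRange_single, h1, h2]
        rw [hNK, List.range_succ_eq_map, searchLoop_cons, if_pos hb1]
        norm_num
      · rw [if_neg hC]
        -- no single range covers both extremes, so N ≥ 2 and a pair does
        have hN2 : 2 ≤ N := by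
          by_contra h
          have hNone : N = 1 := by omega
          apply hC
          refine ⟨0, h0mem, ?_, ?_⟩
          · have h1 : OM = min x0 (pm 0) := by
              rw [hOMdef, hNone, List.range_one]
              rfl
            omega
          · have h1 : OX = max x0 (pM 0) := by
              rw [hOXdef, hNone, List.range_one]
              rfl
            omega
        have hb1 : ((setsOfN rc (((0 : Nat) : Int) + 1)).any (fun comb =>
            match combinedRange comb with
            | some p => p.1 == OM && p.2 == OX
            | none => false)) = false := by
          have h01 : ((0 : Nat) : Int) + 1 = 1 := by norm_num
          rw [h01, ← Bool.not_eq_true, any_cover]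
          rintro ⟨c, hc, hcr⟩
          obtain ⟨p, hp, rfl⟩ := (mem_setsOfN_one rc c).1 hc
          obtain ⟨k, hk, rfl⟩ := List.mem_map.1 hp
          rw [combinedRange_single] at hcr
          apply hC
          refine ⟨k, hk, ?_, ?_⟩
          · exact congrArg Prod.fst (Option.some.inj hcr)
          · exact congrArg Prod.snd (Option.some.inj hcr)
        have hb2 : ((setsOfN rc (((1 : Nat) : Int) + 1)).any (fun comb =>
            match combinedRange comb with
            | some p => p.1 == OM && p.2 == OX
            | none => false)) = true := by
          have h12 : ((1 : Nat) : Int) + 1 = 2 := by norm_num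
          rw [h12, any_cover]
          obtain ⟨k1, hk1, hk1v⟩ := hOM_mem
          obtain ⟨k2, hk2, hk2v⟩ := hOX_mem
          have hne : k1 ≠ k2 := by
            intro h
            exact hC ⟨k1, hk1, hk1v, by rw [h]; exact hk2v⟩
          have hk1N : k1 < N := List.mem_range.1 hk1
          have hk2N : k2 < N := List.mem_range.1 hk2
          have hrclen : rc.length = N := by rw [hrcdef]; simp
          set lo := min k1 k2 with hlo
          set hi := max k1 k2 with hhi
          have hloN : lo < N := by omega
          have hhiN : hi < N := by omega
          refine ⟨[rc.getD hi (0, 0), rc.getD lo (0, 0)], ?_, ?_⟩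
          · exact pair_mem_setsOfN rc lo hi (by omega) (by omega)
          · rw [hrcget lo hloN, hrcget hi hhiN, combinedRange_pair]
            have hbm1 := hOM_le k1 hk1
            have hbm2 := hOM_le k2 hk2
            have hbx1 := hOX_ge k1 hk1
            have hbx2 := hOX_ge k2 hk2
            have hor : (lo = k1 ∧ hi = k2) ∨ (lo = k2 ∧ hi = k1) := by
              rcases Nat.lt_or_ge k1 k2 with h | h
              · left; constructor <;> omega
              · right; constructor <;> omega
            congr 1
            rcases hor with ⟨h1, h2⟩ | ⟨h1, h2⟩ <;> rw [h1, h2] <;>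
              refine Prod.ext ?_ ?_ <;> dsimp only <;> omega
        obtain ⟨K', hNK'⟩ : ∃ K', N = K' + 2 := ⟨N - 2, by omega⟩
        have hrange2 : List.range N = 0 :: 1 :: ((List.range K').map Nat.succ).map Nat.succ := by
          rw [hNK', List.range_succ_eq_map, List.range_succ_eq_map]
          simp
        rw [hrange2, searchLoop_cons, if_neg (by rw [hb1]; simp), searchLoop_cons, if_pos hb2]
        norm_num
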